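-- pv_equiv track=rewrite | github.com/outs1ders/programador | python/mastermind/Parte 3/funcion_3.py | string_more_long
-- ===== SOURCE A (Python) =====
-- def string_more_long(a):
--     string_long = None
--     valor_long = len(a[0])
--     num_ls = 0
--     for valor in range(len(a)):
--         val = len(a[valor])
--         if valor_long < val:
--             valor_long = val
--             num_ls = valor
--         string_long = a[num_ls]
--     return string_long
-- ===== SOURCE B (Python) =====
-- def string_more_long(a):
--     return sorted(a, key=len, reverse=True)[0]
-- ===== Notes on version B (the rewrite author's own statement) =====
-- stated objective: simpler
-- what changed: Replaces A's index-tracking linear scan (running max of lengths with an index variable) by a one-line stable sort by length in descending order followed by taking the first element; ties still yield the first longest string by sort stability.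
import Mathlib
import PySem

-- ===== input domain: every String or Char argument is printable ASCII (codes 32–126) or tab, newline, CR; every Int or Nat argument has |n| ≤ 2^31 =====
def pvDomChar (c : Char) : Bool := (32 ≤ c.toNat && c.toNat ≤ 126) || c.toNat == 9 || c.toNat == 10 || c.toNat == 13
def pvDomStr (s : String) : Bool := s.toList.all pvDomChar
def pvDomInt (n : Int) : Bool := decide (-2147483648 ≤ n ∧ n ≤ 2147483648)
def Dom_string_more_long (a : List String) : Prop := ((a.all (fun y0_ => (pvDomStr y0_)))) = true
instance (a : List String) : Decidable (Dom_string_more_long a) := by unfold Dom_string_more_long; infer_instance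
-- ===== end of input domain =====

-- B replaces A's index-tracking running-max scan with a one-line stable descending sort by
-- length followed by taking the first element (simpler; same first-tie behaviour).

-- ===== PORT A =====
-- literal transliteration of A: state (string_long, valor_long, num_ls), loop over range(len(a))
def string_more_long (a : List String) : String :=
  let valor_long : Int := PySem.Str.len ((PySem.List.pyGet? a 0).getD "")
  let st :=
    (PySem.List.pyRange 0 a.length).foldl
      (fun (st : Option String × Int × Int) valor =>
        let val : Int := PySem.Str.len ((PySem.List.pyGet? a valor).getD "")
        let vn : Int × Int := if st.2.1 < val then (val, valor) else (st.2.1, st.2.2)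
        (PySem.List.pyGet? a vn.2, vn.1, vn.2))
      ((none : Option String), valor_long, (0 : Int))
  st.1.getD ""

-- ===== PORT B =====
def string_more_long_alt (a : List String) : String :=
  (PySem.List.pyGet? (PySem.List.sorted a PySem.Str.len true) 0).getD ""

-- ===== PRECONDITION & SPEC =====
-- A evaluates a[0] (and B indexes [0]): both raise IndexError on the empty list, excluded here.
def Pre_string_more_long (a : List String) : Prop := a ≠ []
instance (a : List String) : Decidable (Pre_string_more_long a) := by unfold Pre_string_more_long; infer_instance
def pvWitness_string_more_long : List String := ["ab", "c", "xyz"]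
def Spec_string_more_long (a : List String) (out : String) : Prop := out = string_more_long_alt a
instance (a : List String) (out : String) : Decidable (Spec_string_more_long a out) := by unfold Spec_string_more_long; infer_instance

-- ===== CLAIM (what is proved, stated in full; the proofs are below) =====
def Claim_equal_string_more_long : Prop := ∀ (a : List String), Dom_string_more_long a → Pre_string_more_long a → Spec_string_more_long a (string_more_long a)

-- ===== LEMMAS AND PROOFS =====

-- the step of PySem.List.max? with key = Str.len, used as a common reference point
def maxStep (acc : Option String) (x : String) : Option String :=
  match acc with
  | none => some x
  | some m => if PySem.Str.len m < PySem.Str.len x then some x else some m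

lemma head?_insertBy (x : String) (ys : List String) :
    (PySem.List.insertBy (fun a b => decide (PySem.Str.len b < PySem.Str.len a)) x ys).head? =
      maxStep ys.head? x := by
  cases ys with
  | nil => simp [PySem.List.insertBy, maxStep]
  | cons y t =>
    by_cases h : y.length < x.length <;>
      simp [PySem.List.insertBy, maxStep, PySem.Str.len, h]

lemma head?_foldl_insertBy (xs ys : List String) :
    (xs.foldl (fun acc x =>
        PySem.List.insertBy (fun a b => decide (PySem.Str.len b < PySem.Str.len a)) x acc) ys).head? =
      xs.foldl maxStep ys.head? := by
  induction xs generalizing ys with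
  | nil => rfl
  | cons x t ih => rw [List.foldl_cons, List.foldl_cons, ih, head?_insertBy]

lemma max?_eq_foldl_maxStep (a : List String) :
    PySem.List.max? a PySem.Str.len = a.foldl maxStep none := by
  unfold PySem.List.max?
  apply PySem.List.foldl_congr_mem
  intro acc x _
  cases acc <;> rfl

lemma head?_sorted_rev (a : List String) :
    (PySem.List.sorted a PySem.Str.len true).head? = PySem.List.max? a PySem.Str.len := by
  rw [PySem.List.sorted_rev_eq_foldl_insertBy, head?_foldl_insertBy, max?_eq_foldl_maxStep]
  rfl

-- the loop of A, named so the invariant below can speak about it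
def aStep (a : List String) (st : Option String × Int × Int) (valor : Int) :
    Option String × Int × Int :=
  let val : Int := PySem.Str.len ((PySem.List.pyGet? a valor).getD "")
  let vn : Int × Int := if st.2.1 < val then (val, valor) else (st.2.1, st.2.2)
  (PySem.List.pyGet? a vn.2, vn.1, vn.2)

-- invariant: from a state that remembers index j (j < k), A's loop over the remaining
-- indices computes the running max of lengths over a.drop k seeded with a[j]
lemma aLoop_inv (a : List String) (k j : Nat) (hj : j < k) (hk : k ≤ a.length)
    (s : String) (hs : a[j]? = some s) :
    ((PySem.List.pyRange (k : Int) (a.length : Int)).foldl (aStep a)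
        (some s, PySem.Str.len s, (j : Int))).1 =
      (a.drop k).foldl maxStep (some s) := by
  induction hn : a.length - k generalizing k j s with
  | zero =>
    have hke : k = a.length := by omega
    subst hke
    simp [PySem.List.pyRange, List.drop_length]
  | succ n ih =>
    have hklt : k < a.length := by omega
    rw [PySem.List.pyRange_one_cons (by exact_mod_cast hklt)]
    have hget : PySem.List.pyGet? a (k : Int) = some a[k] := by
      rw [PySem.List.pyGet?_natCast]; simp [hklt]
    have hdrop : a.drop k = a[k] :: a.drop (k + 1) := List.drop_eq_getElem_cons hklt
    rw [hdrop]
    simp only [List.foldl_cons]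
    have hcast : ((k : Int) + 1) = ((k + 1 : Nat) : Int) := by push_cast; ring
    by_cases h : s.length < a[k].length
    · have hstep : aStep a (some s, PySem.Str.len s, (j : Int)) (k : Int) =
          (some a[k], PySem.Str.len a[k], (k : Int)) := by
        simp [aStep, hget, PySem.Str.len, h]
      rw [hstep, hcast, ih (k + 1) k (by omega) (by omega) a[k] (by simp [hklt]) (by omega)]
      simp [maxStep, PySem.Str.len, h]
    · have hgj : PySem.List.pyGet? a (j : Int) = some s := by
        rw [PySem.List.pyGet?_natCast]; exact hs
      have hstep : aStep a (some s, PySem.Str.len s, (j : Int)) (k : Int) =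
          (some s, PySem.Str.len s, (j : Int)) := by
        simp [aStep, hget, hgj, PySem.Str.len, h]
      rw [hstep, hcast, ih (k + 1) j (by omega) (by omega) s hs (by omega)]
      simp [maxStep, PySem.Str.len, h]

lemma a_eq_max? (a : List String) (ha : a ≠ []) :
    string_more_long a = (PySem.List.max? a PySem.Str.len).getD "" := by
  obtain ⟨x, t, rfl⟩ := List.exists_cons_of_ne_nil ha
  have hget0 : PySem.List.pyGet? (x :: t) 0 = some x := by
    simpa using PySem.List.pyGet?_natCast (x :: t) 0
  have hr : PySem.List.pyRange 0 ((x :: t).length : Int) =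
      (0 : Int) :: PySem.List.pyRange 1 ((x :: t).length : Int) := by
    exact PySem.List.pyRange_one_cons (by exact_mod_cast Nat.succ_pos t.length)
  unfold string_more_long
  rw [show (fun (st : Option String × Int × Int) valor =>
        let val : Int := PySem.Str.len ((PySem.List.pyGet? (x :: t) valor).getD "")
        let vn : Int × Int := if st.2.1 < val then (val, valor) else (st.2.1, st.2.2)
        (PySem.List.pyGet? (x :: t) vn.2, vn.1, vn.2)) = aStep (x :: t) from rfl]
  rw [hr]
  simp only [List.foldl_cons, hget0, Option.getD_some]
  rw [show aStep (x :: t) (none, PySem.Str.len x, (0 : Int)) 0 =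
        (some x, PySem.Str.len x, (0 : Int)) from by simp [aStep]]
  have hinv := aLoop_inv (x :: t) 1 0 Nat.one_pos (by simp) x rfl
  simp only [Nat.cast_one, Nat.cast_zero, List.drop_succ_cons, List.drop_zero] at hinv
  rw [hinv, max?_eq_foldl_maxStep]
  rfl

-- ===== VERDICT (by name: the statement is the Claim_ definition above) =====
theorem string_more_long_spec : Claim_equal_string_more_long := by
  intro a _ ha
  unfold Spec_string_more_long string_more_long_alt
  rw [a_eq_max? a ha]
  cases hsort : PySem.List.sorted a PySem.Str.len true with
  | nil =>
    exact absurd ((PySem.List.sorted_eq_nil_iff a PySem.Str.len true).mp hsort) ha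
  | cons m tl =>
    have hh := head?_sorted_rev a
    rw [hsort] at hh
    have hg : PySem.List.pyGet? (m :: tl) 0 = some m := by
      simpa using PySem.List.pyGet?_natCast (m :: tl) 0
    rw [hg, ← hh]
    rfl
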